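-- pv_equiv track=rewrite | github.com/HaHyunkyung/Hello_Python | 명예의 전당(1).py | solution
-- ===== SOURCE A (Python) =====
-- def solution(k, score):
--     answer = []
--     rank = []
--     for i in range(len(score)):
--         if i<k:
--             rank.append(score[i])
--             rank.sort(reverse = True)
--             answer.append(rank[i])
--         if i >= k:
--             rank.append(score[i])
--             rank.sort(reverse = True)
--             answer.append(rank[k-1])
--
--     return answer
-- ===== SOURCE B (Python) =====
-- def _insort(top, s):
--     # binary-search insertion of s into the ascending list top
--     lo = 0
--     hi = len(top)
--     while lo < hi:
--         mid = (lo + hi) // 2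
--         if top[mid] < s:
--             lo = mid + 1
--         else:
--             hi = mid
--     top.insert(lo, s)
--
--
-- def solution(k, score):
--     answer = []
--     top = []  # ascending buffer of the (at most) k largest scores so far
--     for s in score:
--         if len(top) < k:
--             _insort(top, s)
--         elif s > top[0]:
--             top.pop(0)
--             _insort(top, s)
--         answer.append(top[0])
--     return answer
-- ===== Notes on version B (the rewrite author's own statement) =====
-- stated objective: faster
-- what changed: Instead of re-sorting the whole history every day (A), B keeps an ascending buffer of the at most k largest scores seen so far, updated once per day by a binary-search insertion (evicting the buffer minimum when full); the day's answer is the buffer's first element.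
-- outside the precondition, e.g. on solution(0, [3, 1, 2]): A returns [3, 1, 1], B raises IndexError
import Mathlib
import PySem

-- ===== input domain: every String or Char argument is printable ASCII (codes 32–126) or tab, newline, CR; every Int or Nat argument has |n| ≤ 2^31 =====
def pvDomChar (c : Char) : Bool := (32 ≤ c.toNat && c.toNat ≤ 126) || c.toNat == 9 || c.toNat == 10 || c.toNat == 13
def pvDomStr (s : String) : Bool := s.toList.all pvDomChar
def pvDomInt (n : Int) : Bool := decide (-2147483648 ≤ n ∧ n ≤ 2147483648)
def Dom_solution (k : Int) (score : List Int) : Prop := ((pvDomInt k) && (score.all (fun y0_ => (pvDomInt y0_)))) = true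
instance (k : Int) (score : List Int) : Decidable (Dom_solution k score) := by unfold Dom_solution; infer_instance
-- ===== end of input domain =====

-- B replaces A's per-day full re-sort of the whole history by a bounded ascending buffer
-- of the (at most) k largest scores so far, updated by one insertion per day (objective: faster).


-- ===== PORT A =====
def bodyA (k : Int) (score : List Int) (st : List Int × List Int) (i : Int) : List Int × List Int :=
  let answer := st.1
  let rank := st.2
  let st :=
    if i < k then
      let rank := PySem.List.sorted (rank ++ [(PySem.List.pyGet? score i).getD 0]) (fun x => x) true
      (answer ++ [(PySem.List.pyGet? rank i).getD 0], rank)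
    else (answer, rank)
  let answer := st.1
  let rank := st.2
  if i ≥ k then
    let rank := PySem.List.sorted (rank ++ [(PySem.List.pyGet? score i).getD 0]) (fun x => x) true
    (answer ++ [(PySem.List.pyGet? rank (k - 1)).getD 0], rank)
  else st

def solution (k : Int) (score : List Int) : List Int :=
  ((PySem.List.pyRange 0 (score.length : Int) 1).foldl (bodyA k score) ([], [])).1

-- ===== PORT B =====
-- _insort: binary search (the while loop), then list.insert at position lo
def bsearch (top : List Int) (s : Int) (lo hi : Int) : Int :=
  if h : lo < hi then
    let mid := PySem.Int.floordiv (lo + hi) 2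
    if (PySem.List.pyGet? top mid).getD 0 < s then bsearch top s (mid + 1) hi
    else bsearch top s lo mid
  else lo
termination_by (hi - lo).toNat
decreasing_by
  · have := (PySem.Int.floordiv_two_mid_bounds (le_of_lt h)).1
    omega
  · have hlt : PySem.Int.floordiv (lo + hi) 2 < hi :=
      (PySem.Int.floordiv_lt_iff_lt_mul (by omega)).2 (by omega)
    omega

def binsert (top : List Int) (s : Int) : List Int :=
  PySem.List.insert top (bsearch top s 0 (top.length : Int)) s

def bodyB (k : Int) (st : List Int × List Int) (s : Int) : List Int × List Int :=
  let answer := st.1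
  let top := st.2
  let top :=
    if (top.length : Int) < k then binsert top s
    else if top.headD 0 < s then binsert (top.drop 1) s
    else top
  (answer ++ [top.headD 0], top)

def solution_alt (k : Int) (score : List Int) : List Int :=
  (score.foldl (bodyB k) ([], [])).1

-- ===== PRECONDITION & SPEC =====
-- Pre_ excludes k ≤ 0 with a nonempty score: there A either raises IndexError (k < 0) or
-- returns running minima via Python's negative-index wraparound rank[-1] (k = 0), and B's
-- own algorithm raises IndexError on those inputs (empty buffer indexed).
def Pre_solution (k : Int) (score : List Int) : Prop := 1 ≤ k ∨ score = []
instance (k : Int) (score : List Int) : Decidable (Pre_solution k score) := by unfold Pre_solution; infer_instance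
def pvWitness_solution : Int × List Int := (2, [10, 100, 20, 150])
def Spec_solution (k : Int) (score : List Int) (out : List Int) : Prop := out = solution_alt k score
instance (k : Int) (score : List Int) (out : List Int) : Decidable (Spec_solution k score out) := by unfold Spec_solution; infer_instance

-- ===== CLAIM (what is proved, stated in full; the proofs are below) =====
def Claim_equal_solution : Prop := ∀ (k : Int) (score : List Int), Dom_solution k score → Pre_solution k score → Spec_solution k score (solution k score)

-- ===== LEMMAS AND PROOFS =====

-- descending sort used by A
def sd (l : List Int) : List Int := PySem.List.sorted l (fun x => x) true

-- descending insertion (proof tool relating sd (p ++ [s]) to sd p)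
def insD (s : Int) : List Int → List Int
  | [] => [s]
  | x :: xs => if s ≤ x then x :: insD s xs else s :: x :: xs

-- the common per-day output on prefix q
def gOut (k : Int) (q : List Int) : Int := ((sd q).take k.toNat).getLastD 0

def outs (k : Int) (p : List Int) : List Int → List Int
  | [] => []
  | s :: l => gOut k (p ++ [s]) :: outs k (p ++ [s]) l

-- reference linear insertion (proof tool: binsert coincides with it on sorted lists)
def insortB (top : List Int) (s : Int) : List Int :=
  match top with
  | [] => [s]
  | t :: ts => if t < s then t :: insortB ts s else s :: t :: ts

-- uniqueness of weakly sorted permutations (Int lists)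
lemma uniq_asc {l₁ l₂ : List Int} (hp : l₁.Perm l₂) (h1 : l₁.Pairwise (· ≤ ·))
    (h2 : l₂.Pairwise (· ≤ ·)) : l₁ = l₂ :=
  PySem.List.eq_of_perm_of_pairwise_le_of_injective (fun x : Int => x) (fun _ _ h => h) hp h1 h2

lemma uniq_desc {l₁ l₂ : List Int} (hp : l₁.Perm l₂) (h1 : l₁.Pairwise (fun a b => b ≤ a))
    (h2 : l₂.Pairwise (fun a b => b ≤ a)) : l₁ = l₂ :=
  PySem.List.eq_of_perm_of_pairwise_le_of_injective (fun x : Int => -x) neg_injective hp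
    (h1.imp (fun h => neg_le_neg h)) (h2.imp (fun h => neg_le_neg h))

lemma sd_pairwise (l : List Int) : (sd l).Pairwise (fun a b => b ≤ a) :=
  PySem.List.sorted_pairwise_rev l (fun x => x)

lemma sd_perm (l : List Int) : (sd l).Perm l := PySem.List.sorted_perm l (fun x => x) true

lemma sd_congr {l₁ l₂ : List Int} (h : l₁.Perm l₂) : sd l₁ = sd l₂ :=
  uniq_desc ((sd_perm l₁).trans (h.trans (sd_perm l₂).symm)) (sd_pairwise l₁) (sd_pairwise l₂)

lemma insD_perm (s : Int) (d : List Int) : (insD s d).Perm (s :: d) := by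
  induction d with
  | nil => simp [insD]
  | cons x xs ih =>
      by_cases h : s ≤ x
      · simpa [insD, h] using ((ih.cons x).trans (List.Perm.swap s x xs))
      · simp [insD, h]

lemma insD_pairwise {d : List Int} (s : Int) (hd : d.Pairwise (fun a b => b ≤ a)) :
    (insD s d).Pairwise (fun a b => b ≤ a) := by
  induction d with
  | nil => simp [insD]
  | cons x xs ih =>
      rcases List.pairwise_cons.1 hd with ⟨hx, hxs⟩
      by_cases h : s ≤ x
      · rw [insD, if_pos h]
        refine List.pairwise_cons.2 ⟨?_, ih hxs⟩
        intro y hy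
        rcases List.mem_cons.1 ((insD_perm s xs).mem_iff.1 hy) with rfl | hy
        · exact h
        · exact hx y hy
      · rw [insD, if_neg h]
        refine List.pairwise_cons.2 ⟨?_, hd⟩
        intro y hy
        rcases List.mem_cons.1 hy with rfl | hy
        · omega
        · have := hx y hy; omega

lemma sd_append (p : List Int) (s : Int) : sd (p ++ [s]) = insD s (sd p) :=
  uniq_desc (((sd_perm _).trans (List.perm_append_singleton s p)).trans
      (((insD_perm s (sd p)).trans ((sd_perm p).cons s)).symm))
    (sd_pairwise _) (insD_pairwise s (sd_pairwise p))

lemma insortB_perm (t : List Int) (s : Int) : (insortB t s).Perm (s :: t) := by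
  induction t with
  | nil => simp [insortB]
  | cons x xs ih =>
      by_cases h : x < s
      · simpa [insortB, h] using ((ih.cons x).trans (List.Perm.swap s x xs))
      · simp [insortB, h]

lemma insortB_pairwise {t : List Int} (s : Int) (ht : t.Pairwise (· ≤ ·)) :
    (insortB t s).Pairwise (· ≤ ·) := by
  induction t with
  | nil => simp [insortB]
  | cons x xs ih =>
      rcases List.pairwise_cons.1 ht with ⟨hx, hxs⟩
      by_cases h : x < s
      · rw [insortB, if_pos h]
        refine List.pairwise_cons.2 ⟨?_, ih hxs⟩
        intro y hy
        rcases List.mem_cons.1 ((insortB_perm xs s).mem_iff.1 hy) with rfl | hy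
        · omega
        · exact hx y hy
      · rw [insortB, if_neg h]
        refine List.pairwise_cons.2 ⟨?_, ht⟩
        intro y hy
        rcases List.mem_cons.1 hy with rfl | hy
        · omega
        · have := hx y hy; omega

lemma insD_length (s : Int) (d : List Int) : (insD s d).length = d.length + 1 :=
  (insD_perm s d).length_eq

lemma sd_length (l : List Int) : (sd l).length = l.length := (sd_perm l).length_eq

-- inserting an element below n elements leaves the first n elements unchanged
lemma insD_take_eq {s : Int} : ∀ {d : List Int} {n : Nat}, 0 < n → n ≤ d.length →
    (∀ y ∈ d.take n, s ≤ y) → (insD s d).take n = d.take n := by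
  intro d
  induction d with
  | nil => intro n _ hn _; simp at hn; omega
  | cons x d' ih =>
      intro n hn0 hn hs
      obtain ⟨m, rfl⟩ : ∃ m, n = m + 1 := ⟨n - 1, by omega⟩
      have hsx : s ≤ x := hs x (by simp)
      rw [insD, if_pos hsx]
      simp only [List.take_succ_cons]
      rcases Nat.eq_zero_or_pos m with rfl | hm
      · simp
      · rw [ih hm (by simpa using hn) (fun y hy => hs y (by simp [hy]))]


lemma getLastD_irrel {t : List Int} (h : t ≠ []) (a b : Int) : t.getLastD a = t.getLastD b := by
  cases t with
  | nil => exact absurd rfl h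
  | cons y t' =>
      simp only [List.getLastD_eq_getLast?]
      cases hgl : (y :: t').getLast? with
      | none => exact absurd (List.getLast?_eq_none_iff.1 hgl) (by simp)
      | some z => rfl

lemma getLastD_cons_ne {x : Int} {t : List Int} (h : t ≠ []) :
    (x :: t).getLastD 0 = t.getLastD 0 := by
  rw [List.getLastD_cons]; exact getLastD_irrel h x 0

-- in a descending nonempty list the last element is minimal
lemma desc_getLastD_le : ∀ {l : List Int}, l.Pairwise (fun a b => b ≤ a) → l ≠ [] →
    ∀ y ∈ l, l.getLastD 0 ≤ y := by
  intro l
  induction l with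
  | nil => intro _ h; exact absurd rfl h
  | cons x t ih =>
      intro hp _ y hy
      rcases List.pairwise_cons.1 hp with ⟨hx, ht⟩
      by_cases htne : t = []
      · subst htne; simp at hy; simp [hy]
      · rw [getLastD_cons_ne htne]
        rcases List.mem_cons.1 hy with rfl | hy
        · have hm : t.getLastD 0 ∈ t := by
            cases t with
            | nil => exact absurd rfl htne
            | cons z t' => exact List.mem_of_getLast? rfl
          exact hx _ hm
        · exact ih ht htne y hy

lemma insD_append_of_gt {s : Int} : ∀ {t : List Int} (r : List Int), t ≠ [] →
    t.getLastD 0 < s → insD s (t ++ r) = insD s t ++ r := by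
  intro t
  induction t with
  | nil => intro r h; exact absurd rfl h
  | cons x t' ih =>
      intro r _ hlt
      by_cases htne : t' = []
      · subst htne
        have hx : x < s := by simpa [List.getLastD_cons] using hlt
        rw [List.cons_append, List.nil_append, insD, if_neg (not_le.2 hx), insD,
          if_neg (not_le.2 hx), List.cons_append, List.cons_append, List.nil_append]
      · rw [getLastD_cons_ne htne] at hlt
        by_cases h : s ≤ x
        · rw [List.cons_append, insD, if_pos h, insD, if_pos h, ih r htne hlt, List.cons_append]
        · rw [List.cons_append, insD, if_neg h, insD, if_neg h, List.cons_append, List.cons_append]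

lemma dropLast_insD_perm {s : Int} : ∀ {t : List Int}, t ≠ [] → t.getLastD 0 < s →
    (insD s t).dropLast.Perm (s :: t.dropLast) := by
  intro t
  induction t with
  | nil => intro h; exact absurd rfl h
  | cons x t' ih =>
      intro _ hlt
      by_cases htne : t' = []
      · subst htne
        have hx : x < s := by simpa [List.getLastD_cons] using hlt
        rw [insD, if_neg (not_le.2 hx)]
        simp
      · rw [getLastD_cons_ne htne] at hlt
        by_cases h : s ≤ x
        · rw [insD, if_pos h]
          have hne : insD s t' ≠ [] := by
            have := insD_length s t'; intro hc; rw [hc] at this; simp at this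
          rw [List.dropLast_cons_of_ne_nil hne, List.dropLast_cons_of_ne_nil htne]
          exact ((ih htne hlt).cons x).trans (List.Perm.swap s x _)
        · rw [insD, if_neg h, List.dropLast_cons_of_ne_nil (by simp),
            List.dropLast_cons_of_ne_nil htne]

lemma insortB_eq_tw (s : Int) : ∀ top : List Int,
    insortB top s = top.takeWhile (fun t => t < s) ++ s :: top.dropWhile (fun t => t < s) := by
  intro top
  induction top with
  | nil => simp [insortB]
  | cons x ts ih =>
      by_cases h : x < s
      · simp [insortB, h, ih]
      · simp [insortB, h]

lemma takeWhile_dropWhile_of_boundary (p : Int → Bool) :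
    ∀ (l : List Int) (r : Nat), r ≤ l.length →
    (∀ i (h : i < l.length), i < r → p l[i]) →
    (∀ i (h : i < l.length), r ≤ i → ¬ p l[i] = true) →
    l.takeWhile p = l.take r ∧ l.dropWhile p = l.drop r := by
  intro l
  induction l with
  | nil =>
      intro r hr _ _
      simp only [List.length_nil, Nat.le_zero] at hr
      subst hr; simp
  | cons x t ih =>
      intro r hr h1 h2
      cases r with
      | zero =>
          have hx := h2 0 (by simp) (by omega)
          simp only [List.getElem_cons_zero] at hx
          simp [hx]
      | succ r' =>
          have hx : p x := by simpa using h1 0 (by simp) (by omega)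
          have hrec := ih r' (by simpa using hr)
            (fun i h hi => by simpa using h1 (i + 1) (by simpa using h) (by omega))
            (fun i h hi => by simpa using h2 (i + 1) (by simpa using h) (by omega))
          simp [hx, hrec.1, hrec.2]

lemma bsearch_spec (top : List Int) (s : Int)
    (hmono : ∀ i j (hi' : i < top.length) (hj : j < top.length), i ≤ j → top[i] ≤ top[j]) :
    ∀ (n : Nat) (lo hi : Int), (hi - lo).toNat = n → 0 ≤ lo → lo ≤ hi → hi ≤ (top.length : Int) →
    (∀ i : Nat, (h : i < top.length) → (i : Int) < lo → top[i] < s) →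
    (∀ i : Nat, (h : i < top.length) → hi ≤ (i : Int) → s ≤ top[i]) →
    0 ≤ bsearch top s lo hi ∧ bsearch top s lo hi ≤ (top.length : Int) ∧
    (∀ i : Nat, (h : i < top.length) → (i : Int) < bsearch top s lo hi → top[i] < s) ∧
    (∀ i : Nat, (h : i < top.length) → bsearch top s lo hi ≤ (i : Int) → s ≤ top[i]) := by
  intro n
  induction n using Nat.strong_induction_on with
  | _ n ih =>
      intro lo hi hm h0 hle hhi hlow hhigh
      rw [bsearch]
      by_cases h : lo < hi
      · simp only [dif_pos h]
        have hmid := PySem.Int.floordiv_two_mid_bounds (le_of_lt h)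
        have hmidlt : PySem.Int.floordiv (lo + hi) 2 < hi :=
          (PySem.Int.floordiv_lt_iff_lt_mul (by omega)).2 (by omega)
        set mid := PySem.Int.floordiv (lo + hi) 2 with hmiddef
        have hmidn : mid = ((mid.toNat : Nat) : Int) := (Int.toNat_of_nonneg (by omega)).symm
        have hmlen : mid.toNat < top.length := by omega
        have hget : PySem.List.pyGet? top mid = some top[mid.toNat] := by
          conv_lhs => rw [hmidn, PySem.List.pyGet?_natCast]
          exact List.getElem?_eq_getElem hmlen
        rw [hget, Option.getD_some]
        by_cases hc : top[mid.toNat] < s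
        · rw [if_pos hc]
          refine ih (hi - (mid + 1)).toNat (by omega) (mid + 1) hi (by rfl) (by omega)
            (by omega) hhi ?_ hhigh
          intro i h' hilt
          have : i ≤ mid.toNat := by omega
          exact lt_of_le_of_lt (hmono i mid.toNat h' hmlen this) hc
        · rw [if_neg hc]
          refine ih (mid - lo).toNat (by omega) lo mid (by rfl) h0 (by omega) (by omega)
            hlow ?_
          intro i h' hige
          have : mid.toNat ≤ i := by omega
          exact le_trans (not_lt.1 hc) (hmono mid.toNat i hmlen h' this)
      · simp only [dif_neg h]
        have : lo = hi := by omega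
        exact ⟨h0, by omega, fun i h' hi' => hlow i h' hi', fun i h' hi' => hhigh i h' (by omega)⟩

lemma binsert_eq_insortB {top : List Int} (s : Int) (hst : top.Pairwise (· ≤ ·)) :
    binsert top s = insortB top s := by
  have hmono : ∀ i j (hi' : i < top.length) (hj : j < top.length), i ≤ j → top[i] ≤ top[j] := by
    intro i j hi' hj hij
    rcases Nat.lt_or_ge i j with hlt | hge
    · exact List.pairwise_iff_getElem.1 hst i j hi' hj hlt
    · have : i = j := by omega
      subst this; rfl
  have hspec := bsearch_spec top s hmono ((top.length : Int) - 0).toNat 0 (top.length : Int)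
    rfl (by omega) (by omega) (by omega)
    (fun i h hi' => absurd hi' (by omega))
    (fun i h hi' => absurd hi' (by omega))
  obtain ⟨hr0, hrlen, hlow, hhigh⟩ := hspec
  set r := bsearch top s 0 (top.length : Int) with hrdef
  have hrn : r = ((r.toNat : Nat) : Int) := (Int.toNat_of_nonneg hr0).symm
  rw [binsert, ← hrdef, hrn, PySem.List.insert_natCast top r.toNat s (by omega),
    insortB_eq_tw]
  have hb := takeWhile_dropWhile_of_boundary (fun t => decide (t < s)) top r.toNat (by omega)
    (fun i h hi' => by simpa using hlow i h (by omega))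
    (fun i h hi' => by simpa using hhigh i h (by omega))
  rw [hb.1, hb.2]

def topOf (k : Int) (p : List Int) : List Int := ((sd p).take k.toNat).reverse

lemma headD_reverse_int (l : List Int) : l.reverse.headD 0 = l.getLastD 0 := by
  simp [List.headD_eq_head?_getD, List.getLastD_eq_getLast?, List.head?_reverse]

lemma stepB (k : Int) (hk : 1 ≤ k) (p : List Int) (s : Int) (ans : List Int) :
    bodyB k (ans, topOf k p) s = (ans ++ [gOut k (p ++ [s])], topOf k (p ++ [s])) := by
  have hd : (sd p).Pairwise (fun a b => b ≤ a) := sd_pairwise p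
  have htopeq : (if ((topOf k p).length : Int) < k then binsert (topOf k p) s
      else if (topOf k p).headD 0 < s then binsert ((topOf k p).drop 1) s
      else topOf k p) = topOf k (p ++ [s]) := by
    by_cases hlt : (sd p).length < k.toNat
    · -- fewer than k scores so far: plain insertion
      have hc1 : ((topOf k p).length : Int) < k := by
        simp only [topOf, List.length_reverse, List.length_take]
        omega
      rw [if_pos hc1]
      have htake : (sd p).take k.toNat = sd p := List.take_of_length_le (by omega)
      have htake' : (insD s (sd p)).take k.toNat = insD s (sd p) :=
        List.take_of_length_le (by rw [insD_length]; omega)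
      simp only [topOf, sd_append, htake, htake']
      rw [binsert_eq_insortB s (List.pairwise_reverse.2 hd)]
      refine uniq_asc ?_ ?_ ?_
      · have h1 : (insortB (sd p).reverse s).Perm (s :: sd p) :=
          (insortB_perm _ s).trans ((sd p).reverse_perm.cons s)
        have h2 : ((insD s (sd p)).reverse).Perm (s :: sd p) :=
          (insD s (sd p)).reverse_perm.trans (insD_perm s (sd p))
        exact h1.trans h2.symm
      · exact insortB_pairwise s (List.pairwise_reverse.2 hd)
      · exact List.pairwise_reverse.2 (insD_pairwise s hd)
    · -- buffer already holds k scores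
      have hge : k.toNat ≤ (sd p).length := by omega
      have hc1 : ¬ ((topOf k p).length : Int) < k := by
        simp only [topOf, List.length_reverse, List.length_take]
        omega
      rw [if_neg hc1]
      have htl : ((sd p).take k.toNat).length = k.toNat := by
        simp [List.length_take]; omega
      have htne : (sd p).take k.toNat ≠ [] := by
        intro hc; rw [hc] at htl; simp at htl; omega
      have htdesc : ((sd p).take k.toNat).Pairwise (fun a b => b ≤ a) :=
        hd.sublist (List.take_sublist _ _)
      have hhead : (topOf k p).headD 0 = ((sd p).take k.toNat).getLastD 0 :=
        headD_reverse_int _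
      by_cases hc2 : (topOf k p).headD 0 < s
      · -- new score beats the buffer minimum: replace it
        rw [if_pos hc2]
        rw [hhead] at hc2
        have hsplit : insD s (sd p) = insD s ((sd p).take k.toNat) ++ (sd p).drop k.toNat := by
          conv_lhs => rw [← List.take_append_drop k.toNat (sd p)]
          exact insD_append_of_gt _ htne hc2
        have hins_len : (insD s ((sd p).take k.toNat)).length = k.toNat + 1 := by
          rw [insD_length, htl]
        have htake' : (sd (p ++ [s])).take k.toNat = (insD s ((sd p).take k.toNat)).dropLast := by
          rw [sd_append, hsplit, List.take_append, hins_len, List.dropLast_eq_take, hins_len]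
          simp only [show k.toNat - (k.toNat + 1) = 0 from by omega, Nat.add_sub_cancel,
            List.take_zero, List.append_nil]
        simp only [topOf, htake', List.drop_one, List.tail_reverse]
        rw [binsert_eq_insortB s
          (List.pairwise_reverse.2 (htdesc.sublist (List.dropLast_sublist _)))]
        refine uniq_asc ?_ ?_ ?_
        · have h1 : (insortB ((sd p).take k.toNat).dropLast.reverse s).Perm
              (s :: ((sd p).take k.toNat).dropLast) :=
            (insortB_perm _ s).trans (((sd p).take k.toNat).dropLast.reverse_perm.cons s)
          have h2 : ((insD s ((sd p).take k.toNat)).dropLast.reverse).Perm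
              (s :: ((sd p).take k.toNat).dropLast) :=
            (insD s ((sd p).take k.toNat)).dropLast.reverse_perm.trans
              (dropLast_insD_perm htne hc2)
          exact h1.trans h2.symm
        · exact insortB_pairwise s
            (List.pairwise_reverse.2 (htdesc.sublist (List.dropLast_sublist _)))
        · exact List.pairwise_reverse.2
            ((insD_pairwise s htdesc).sublist (List.dropLast_sublist _))
      · -- new score does not make the top k: buffer unchanged
        rw [if_neg hc2]
        rw [hhead] at hc2
        have hforall : ∀ y ∈ (sd p).take k.toNat, s ≤ y := by
          intro y hy
          have := desc_getLastD_le htdesc htne y hy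
          omega
        simp only [topOf, sd_append, insD_take_eq (show 0 < k.toNat from by omega) hge hforall]
  simp only [bodyB]
  rw [htopeq]
  simp only [gOut, topOf, headD_reverse_int]

lemma getLastD_eq_getElem? (l : List Int) : l.getLastD 0 = (l[l.length - 1]?).getD 0 := by
  rw [List.getLastD_eq_getLast?, List.getLast?_eq_getElem?]

lemma sorted_append_singleton (p : List Int) (s : Int) :
    PySem.List.sorted (sd p ++ [s]) (fun x => x) true = sd (p ++ [s]) :=
  sd_congr ((List.perm_append_right_iff [s]).mpr (sd_perm p))

lemma stepA (k : Int) (score : List Int) (hk : 1 ≤ k) (p l ans : List Int) (s : Int)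
    (hscore : score = p ++ s :: l) :
    bodyA k score (ans, sd p) (p.length : Int) = (ans ++ [gOut k (p ++ [s])], sd (p ++ [s])) := by
  have hget : (PySem.List.pyGet? score (p.length : Int)).getD 0 = s := by
    rw [hscore, PySem.List.pyGet?_natCast]; simp
  have hlen' : (sd (p ++ [s])).length = p.length + 1 := by
    rw [sd_length]; simp
  by_cases hc : (p.length : Int) < k
  · have hc2 : ¬ ((p.length : Int) ≥ k) := by omega
    simp only [bodyA, if_pos hc, if_neg hc2, hget, sorted_append_singleton]
    have helt : (PySem.List.pyGet? (sd (p ++ [s])) (p.length : Int)).getD 0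
        = gOut k (p ++ [s]) := by
      rw [PySem.List.pyGet?_natCast, gOut,
        List.take_of_length_le (by rw [hlen']; omega), getLastD_eq_getElem?, hlen']
      simp
    rw [helt]
  · have hc2 : ((p.length : Int) ≥ k) := by omega
    simp only [bodyA, if_neg hc, if_pos hc2, hget, sorted_append_singleton]
    have helt : (PySem.List.pyGet? (sd (p ++ [s])) (k - 1)).getD 0 = gOut k (p ++ [s]) := by
      have hcast : (k - 1) = (((k - 1).toNat : Nat) : Int) := by omega
      rw [hcast, PySem.List.pyGet?_natCast, gOut, getLastD_eq_getElem?, List.length_take, hlen']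
      have hmin : min k.toNat (p.length + 1) = k.toNat := by omega
      rw [hmin, List.getElem?_take_of_lt (by omega)]
      have : k.toNat - 1 = (k - 1).toNat := by omega
      rw [this]
    rw [helt]

lemma loopB (k : Int) (hk : 1 ≤ k) (l : List Int) : ∀ (p ans : List Int),
    l.foldl (bodyB k) (ans, topOf k p) = (ans ++ outs k p l, topOf k (p ++ l)) := by
  induction l with
  | nil => intro p ans; simp [outs]
  | cons s l ih =>
      intro p ans
      rw [List.foldl_cons, stepB k hk, ih (p ++ [s]), outs]
      simp

lemma loopA (k : Int) (score : List Int) (hk : 1 ≤ k) (l : List Int) :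
    ∀ (p ans : List Int), score = p ++ l →
    (PySem.List.pyRange (p.length : Int) (score.length : Int)).foldl (bodyA k score) (ans, sd p)
      = (ans ++ outs k p l, sd score) := by
  induction l with
  | nil =>
      intro p ans hscore
      subst hscore
      rw [List.append_nil, PySem.List.pyRange_one_eq_nil (by omega)]
      simp [outs]
  | cons s l ih =>
      intro p ans hscore
      have hlt : (p.length : Int) < (score.length : Int) := by
        rw [hscore]; simp
      rw [PySem.List.pyRange_one_cons hlt, List.foldl_cons, stepA k score hk p l ans s hscore]
      have hcast : ((p ++ [s]).length : Int) = (p.length : Int) + 1 := by simp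
      have := ih (p ++ [s]) (ans ++ [gOut k (p ++ [s])]) (by rw [hscore]; simp)
      rw [hcast] at this
      rw [this, outs]
      simp

-- ===== VERDICT (by name: the statement is the Claim_ definition above) =====
theorem solution_spec : Claim_equal_solution := by
  unfold Claim_equal_solution
  intro k score _ hpre
  unfold Spec_solution
  rcases hpre with hk | rfl
  · unfold solution solution_alt
    have hA := loopA k score hk score [] [] rfl
    have hB := loopB k hk score [] []
    have h1 : sd ([] : List Int) = [] := rfl
    have h2 : topOf k ([] : List Int) = [] := by rw [topOf, h1]; simp
    rw [h1] at hA
    rw [h2] at hB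
    simp only [List.length_nil, Nat.cast_zero] at hA
    rw [hA, hB]
  · unfold solution solution_alt
    rw [PySem.List.pyRange_one_eq_nil (by simp)]
    rfl
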